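-- pv_equiv track=rewrite | github.com/bgawkuc/ASD-AGH-2021 | Greedy Algorithms/frog.py | zbigniew
-- ===== SOURCE A (Python) =====
-- from queue import PriorityQueue
--
-- def zbigniew(A):
--     n = len(A)
--     #far - zasięg skoku żaby
--     far = A[0]
--     # ilosc skoków
--     cnt = 1
--
--     #gdy z pola o indeksie 0 doskoczę do końca to wystarczy tylko 1 skok
--     if far >= n-1:
--         return cnt
--
--     q = PriorityQueue()
--     #do pq  dodaje wszystkie pola w zasięgu żaby
--     #dodaje z minusem by wyciągac po polach o największej iloći energii
--     idx = 1
--     while idx < n and idx <= far: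
--         q.put((-A[idx],idx))
--         idx += 1
--
--     #dopoki zasieg zaby jest mniejszy od indeksu ostatniego pola
--     while far < n-1:
--         #wyjmuje pole z kolejki o max energii, zwiekszam zasięg
--         energy,i = q.get()
--         far += abs(energy)
--
--         #zwiekszam ilosc skokow
--         cnt += 1
--
--         # dodaje do pq wszyskie pola w nowym zasięgu
--         while idx < n and idx <= far:
--             q.put((-A[idx],idx))
--             idx += 1
--
--     return cnt
-- ===== SOURCE B (Python) =====
-- def zbigniew(A):
--     n = len(A)
--     far = A[0]
--     cnt = 1
--     if far >= n - 1:
--         return cnt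
--     cand = []   # reachable, not-yet-used field indices, kept in increasing order
--     nxt = 1
--     while far < n - 1:
--         while nxt < n and nxt <= far:
--             cand.append(nxt)
--             nxt += 1
--         best = max(cand, key=lambda i: A[i])   # linear scan for the max-energy reachable field
--         cand.remove(best)
--         far += abs(A[best])
--         cnt += 1
--     return cnt
-- ===== Notes on version B (the rewrite author's own statement) =====
-- stated objective: simpler
-- what changed: Replaces the PriorityQueue of negated (energy, index) pairs by a plain list of reachable unused indices that is scanned linearly (max with a key) for the best jump, dropping the heap and the sign trick.
-- outside the precondition, e.g. on zbigniew([]): A raises IndexError, B raises IndexError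
import Mathlib
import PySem

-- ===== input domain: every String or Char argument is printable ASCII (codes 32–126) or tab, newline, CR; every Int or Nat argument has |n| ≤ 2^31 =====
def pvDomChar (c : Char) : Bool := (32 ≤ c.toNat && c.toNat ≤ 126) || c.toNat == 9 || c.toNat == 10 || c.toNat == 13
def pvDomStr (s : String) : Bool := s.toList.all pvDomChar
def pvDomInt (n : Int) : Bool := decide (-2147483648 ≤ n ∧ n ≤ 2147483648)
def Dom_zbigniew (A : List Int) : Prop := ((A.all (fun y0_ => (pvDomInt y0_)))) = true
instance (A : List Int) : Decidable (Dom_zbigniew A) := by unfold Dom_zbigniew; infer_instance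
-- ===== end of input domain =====

-- B replaces A's PriorityQueue of negated energies by a plain list of reachable unused indices
-- scanned linearly for the max-energy field (objective: simpler). Equivalence is about the
-- return value; A raises IndexError on an empty list and blocks forever (q.get on an empty
-- queue) exactly when some frontier f ≤ n-2 satisfies f = a0 + Σ_{i=1..f}|A.get i|, where a0
-- is the first element; Pre_ excludes both.

-- list indexing, used by both programs only with an index in range (exact there)
def pvVal (A : List Int) (i : Nat) : Int := (PySem.List.pyGet? A (i : Int)).getD 0

-- ===== PORT A =====
-- PriorityQueue ported as a list of pairs: put = append, get = remove the lexicographically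
-- least pair (exactly the tuple order Python's heap uses; pairs are distinct in the second slot)
def pvPairLt (a b : Int × Int) : Bool := a.1 < b.1 || (a.1 == b.1 && a.2 < b.2)

-- the inner `while idx < n and idx <= far: q.put((-A[idx], idx)); idx += 1` loop
def pvPushA (A : List Int) (far : Int) (idx : Nat) (q : List (Int × Int)) : Nat × List (Int × Int) :=
  if idx < A.length ∧ (idx : Int) ≤ far then
    pvPushA A far (idx + 1) (q ++ [(-(pvVal A idx), (idx : Int))])
  else (idx, q)
termination_by A.length - idx
decreasing_by omega

-- the outer `while far < n-1` loop; fuel = len A bounds the ≤ n-1 possible q.get() calls;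
-- an empty queue (where Python's q.get() blocks forever, outside Pre_) yields the sentinel 0
def pvLoopA (A : List Int) : Nat → Nat → List (Int × Int) → Int → Int → Int
  | 0, _, _, _, _ => 0
  | fuel + 1, idx, q, far, cnt =>
    if far < (A.length : Int) - 1 then
      match q with
      | [] => 0
      | x :: xs =>
        let m := xs.foldl (fun a b => if pvPairLt b a then b else a) x
        let far' := far + |m.1|
        pvLoopA A fuel (pvPushA A far' idx ((x :: xs).erase m)).1
          (pvPushA A far' idx ((x :: xs).erase m)).2 far' (cnt + 1)
    else cnt

def zbigniew (A : List Int) : Int :=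
  match A with
  | [] => 0   -- Python raises IndexError reading the first element; excluded by Pre_
  | a0 :: _ =>
    if a0 ≥ (A.length : Int) - 1 then 1
    else
      pvLoopA A A.length (pvPushA A a0 1 []).1 (pvPushA A a0 1 []).2 a0 1

-- ===== PORT B =====
-- `max(cand, key=lambda i: A[i])` : first element attaining the maximal energy
def pvBest (A : List Int) : List Nat → Option Nat
  | [] => none
  | j :: l => some (l.foldl (fun k i => if pvVal A i > pvVal A k then i else k) j)

-- `while nxt < n and nxt <= far: cand.append(nxt); nxt += 1`
def pvPushB (A : List Int) (far : Int) (nxt : Nat) (cand : List Nat) : Nat × List Nat :=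
  if nxt < A.length ∧ (nxt : Int) ≤ far then
    pvPushB A far (nxt + 1) (cand ++ [nxt])
  else (nxt, cand)
termination_by A.length - nxt
decreasing_by omega

-- B's `while far < n-1` loop; empty cand (Python: max([]) raises, outside Pre_) yields 0
def pvLoopB (A : List Int) : Nat → Nat → List Nat → Int → Int → Int
  | 0, _, _, _, _ => 0
  | fuel + 1, nxt, cand, far, cnt =>
    if far < (A.length : Int) - 1 then
      match pvBest A (pvPushB A far nxt cand).2 with
      | none => 0
      | some j =>
        pvLoopB A fuel (pvPushB A far nxt cand).1 ((pvPushB A far nxt cand).2.erase j)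
          (far + |pvVal A j|) (cnt + 1)
    else cnt

def zbigniew_alt (A : List Int) : Int :=
  match A with
  | [] => 0
  | a0 :: _ =>
    if a0 ≥ (A.length : Int) - 1 then 1
    else pvLoopB A A.length 1 [] a0 1

-- ===== PRECONDITION & SPEC =====
-- Pre_ excludes the empty list (A raises IndexError) and exactly the inputs on which A's
-- q.get() blocks forever on an empty queue: those where some frontier f ≤ n-2 is a fixed
-- point f = a0 + Σ_{i=1..f}|A.get i| (f ≤ 0 forces f = a0, the empty sum).
def Pre_zbigniew (A : List Int) : Prop :=
  A ≠ [] ∧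
  ¬(A.headD 0 ≤ 0 ∧ A.headD 0 ≤ (A.length : Int) - 2) ∧
  ∀ m ∈ List.range' 1 (A.length - 2),
    A.headD 0 + (((A.drop 1).take m).map (fun x => |x|)).sum ≠ (m : Int)
instance (A : List Int) : Decidable (Pre_zbigniew A) := by unfold Pre_zbigniew; infer_instance

def pvWitness_zbigniew : List Int := [2, 1, 1, 1, 1]

def Spec_zbigniew (A : List Int) (out : Int) : Prop := out = zbigniew_alt A
instance (A : List Int) (out : Int) : Decidable (Spec_zbigniew A out) := by unfold Spec_zbigniew; infer_instance

-- ===== CLAIM (what is proved, stated in full; the proofs are below) =====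
def Claim_equal_zbigniew : Prop := ∀ (A : List Int), Dom_zbigniew A → Pre_zbigniew A → Spec_zbigniew A (zbigniew A)

-- ===== LEMMAS AND PROOFS =====

-- A's queue entry for field i
def pvPair (A : List Int) (i : Nat) : Int × Int := (-(pvVal A i), (i : Int))

lemma pvPair_inj (A : List Int) : Function.Injective (pvPair A) := by
  intro a b h
  have := congrArg Prod.snd h
  simpa [pvPair] using this

-- the two push loops are the same loop, through `map (pvPair A)`
lemma push_corr (A : List Int) (far : Int) (nxt : Nat) (cand : List Nat) :
    pvPushA A far nxt (cand.map (pvPair A)) =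
      ((pvPushB A far nxt cand).1, (pvPushB A far nxt cand).2.map (pvPair A)) := by
  fun_induction pvPushB A far nxt cand with
  | case1 nxt cand h ih =>
    rw [pvPushA]
    simp only [h]
    simpa [pvPair] using ih
  | case2 nxt cand h =>
    rw [pvPushA]
    simp [h]

lemma push_spec (A : List Int) (far : Int) (nxt : Nat) (cand : List Nat)
    (hb : ∀ i ∈ cand, i < nxt) (hp : List.Pairwise (· < ·) cand) :
    (∀ i ∈ (pvPushB A far nxt cand).2, i < (pvPushB A far nxt cand).1) ∧
      List.Pairwise (· < ·) (pvPushB A far nxt cand).2 := by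
  fun_induction pvPushB A far nxt cand with
  | case1 nxt cand h ih =>
    apply ih
    · intro i hi
      rcases List.mem_append.1 hi with h1 | h1
      · exact Nat.lt_succ_of_lt (hb i h1)
      · simp at h1; omega
    · rw [List.pairwise_append]
      refine ⟨hp, by simp, ?_⟩
      intro a ha b hb'
      simp at hb'; subst hb'
      exact hb a ha
  | case2 nxt cand h => exact ⟨hb, hp⟩

-- extracting the lexicographic minimum of the negated pairs is scanning for the first
-- maximal energy, provided the indices are increasing and above the accumulator's
lemma fold_corr (A : List Int) (l : List Nat) : ∀ (j : Nat),
    (∀ i ∈ l, j < i) → List.Pairwise (· < ·) l →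
    (l.map (pvPair A)).foldl (fun a b => if pvPairLt b a then b else a) (pvPair A j)
      = pvPair A (l.foldl (fun k i => if pvVal A i > pvVal A k then i else k) j) := by
  induction l with
  | nil => intro j _ _; rfl
  | cons i t ih =>
    intro j hj hp
    rw [List.pairwise_cons] at hp
    have hji : j < i := hj i (by simp)
    have step : (if pvPairLt (pvPair A i) (pvPair A j) then pvPair A i else pvPair A j)
        = pvPair A (if pvVal A i > pvVal A j then i else j) := by
      by_cases hv : pvVal A i > pvVal A j
      · have e1 : -pvVal A i < -pvVal A j := by omega
        have h1 : pvPairLt (pvPair A i) (pvPair A j) = true := by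
          simp [pvPairLt, pvPair, e1]
        simp [h1, hv]
      · have e1 : ¬(-pvVal A i < -pvVal A j) := by omega
        have h1 : pvPairLt (pvPair A i) (pvPair A j) = false := by
          by_cases e2 : pvVal A i = pvVal A j
          · have e3 : ¬((i : Int) < (j : Int)) := by
              omega
            simp [pvPairLt, pvPair, e2, e3]
          · have e4 : ¬(-pvVal A i = -pvVal A j) := by omega
            simp [pvPairLt, pvPair, e1, e4]
        simp [h1, hv]
    simp only [List.map_cons, List.foldl_cons, step]
    apply ih
    · intro i' hi'
      have h2 := hp.1 i' hi'
      split <;> omega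
    · exact hp.2

-- the two outer loops agree, through `map (pvPair A)` (A's state is B's after pushing)
lemma loop_corr (A : List Int) (fuel : Nat) : ∀ (nxt : Nat) (cand : List Nat) (far cnt : Int),
    (∀ i ∈ cand, i < nxt) → List.Pairwise (· < ·) cand →
    pvLoopA A fuel (pvPushB A far nxt cand).1 ((pvPushB A far nxt cand).2.map (pvPair A)) far cnt
      = pvLoopB A fuel nxt cand far cnt := by
  induction fuel with
  | zero => intro nxt cand far cnt _ _; rfl
  | succ fuel ih =>
    intro nxt cand far cnt hb hp
    obtain ⟨hb', hp'⟩ := push_spec A far nxt cand hb hp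
    simp only [pvLoopA, pvLoopB]
    by_cases hfar : far < (A.length : Int) - 1
    · simp only [if_pos hfar]
      cases hc : (pvPushB A far nxt cand).2 with
      | nil => simp [pvBest]
      | cons j0 t =>
        rw [hc] at hb' hp'
        rw [List.pairwise_cons] at hp'
        have hmin := fold_corr A t j0 hp'.1 hp'.2
        simp only [List.map_cons, pvBest, hmin]
        have herase : (pvPair A j0 :: t.map (pvPair A)).erase
            (pvPair A (t.foldl (fun k i => if pvVal A i > pvVal A k then i else k) j0))
            = ((j0 :: t).erase
                (t.foldl (fun k i => if pvVal A i > pvVal A k then i else k) j0)).map (pvPair A) := by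
          simpa using (List.map_erase (pvPair_inj A) (l := j0 :: t)
            (a := t.foldl (fun k i => if pvVal A i > pvVal A k then i else k) j0)).symm
        rw [herase]
        have habs : |(pvPair A (t.foldl (fun k i => if pvVal A i > pvVal A k then i else k) j0)).1|
            = |pvVal A (t.foldl (fun k i => if pvVal A i > pvVal A k then i else k) j0)| := by
          simp [pvPair]
        rw [habs, push_corr]
        apply ih
        · intro i hi
          exact hb' i (List.erase_sublist.mem hi)
        · exact List.Pairwise.sublist List.erase_sublist (by rw [List.pairwise_cons]; exact hp')
    · simp [if_neg hfar]

theorem ports_eq (A : List Int) : zbigniew A = zbigniew_alt A := by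
  cases A with
  | nil => rfl
  | cons a0 rest =>
    simp only [zbigniew, zbigniew_alt]
    by_cases h : ((rest.length : Int) ≤ a0)
    · simp [h]
    · have h2 : ¬(a0 ≥ ((a0 :: rest).length : Int) - 1) := by
        simp only [List.length_cons]; push_cast; omega
      rw [if_neg h2, if_neg h2]
      have hpush := push_corr (a0 :: rest) a0 1 []
      simp only [List.map_nil] at hpush
      rw [hpush]
      exact loop_corr (a0 :: rest) (a0 :: rest).length 1 [] a0 1 (by simp) (by simp)

-- ===== VERDICT (by name: the statement is the Claim_ definition above) =====
theorem zbigniew_spec : Claim_equal_zbigniew := by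
  intro A _ _
  show zbigniew A = zbigniew_alt A
  exact ports_eq A
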